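-- pv_equiv track=rewrite | github.com/yskang/AlgorithmPractice | baekjoon/python/im_going_to_meet_18235.py | solution
-- ===== SOURCE A (Python) =====
-- from collections import deque
--
-- def bfs(n: int, b: int):
--     queue = deque()
--     queue.append((b, 0))
--
--     positions = set()
--
--     yield
--
--     t = 0
--     while queue:
--         ori, time = queue.popleft()
--         positions.discard((ori, time))
--
--         if t != time:
--             t += 1
--             positions.add((ori, time))
--             yield positions
--             positions.discard((ori, time))
--
--         p = ori - pow(2, time)
--         if 0 < p:
--             queue.append((p, time+1))
--             positions.add((p, time+1))
--         p = ori + pow(2, time)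
--         if p <= n:
--             queue.append((p, time+1))
--             positions.add((p, time+1))
--
--     yield -1
--
-- def solution(n: int, a: int, b: int):
--     queue = deque()
--     queue.append((a, 0))
--
--     bfs_co = bfs(n, b)
--     next(bfs_co)
--
--     t = 0
--     while queue:
--         ori, time = queue.popleft()
--
--         if t != time:
--             t += 1
--             ori_b = next(bfs_co)
--             if ori_b == -1:
--                 return -1
--             if ((ori, time)) in ori_b:
--                 return time
--             for ori_a in queue:
--                 if ori_a in ori_b:
--                     return time
--
--         p = ori - pow(2, time)
--         if p > 0:
--             queue.append((p, time+1))
--         p = ori + pow(2, time)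
--         if p <= n:
--             queue.append((p, time+1))
--
--     return -1
-- ===== SOURCE B (Python) =====
-- def solution(n, a, b):
--     sa, sb = {a}, {b}
--     t = 0
--     while sa and sb:
--         step = 2 ** t
--         t += 1
--         sa = {p - step for p in sa if p - step > 0} | {p + step for p in sa if p + step <= n}
--         sb = {p - step for p in sb if p - step > 0} | {p + step for p in sb if p + step <= n}
--         if not sb:
--             return -1
--         if sa & sb:
--             return t
--     return -1
-- ===== Notes on version B (the rewrite author's own statement) =====
-- stated objective: simpler
-- what changed: Replaced A's per-state (pos,time) deque BFS that drives a second BFS through a generator coroutine (with a mutable positions set snapshotted at each yield) by two plain per-level position sets recomputed with one set pass per level and intersected once per level, starting the intersection test at level 1 exactly as A does.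
import Mathlib
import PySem

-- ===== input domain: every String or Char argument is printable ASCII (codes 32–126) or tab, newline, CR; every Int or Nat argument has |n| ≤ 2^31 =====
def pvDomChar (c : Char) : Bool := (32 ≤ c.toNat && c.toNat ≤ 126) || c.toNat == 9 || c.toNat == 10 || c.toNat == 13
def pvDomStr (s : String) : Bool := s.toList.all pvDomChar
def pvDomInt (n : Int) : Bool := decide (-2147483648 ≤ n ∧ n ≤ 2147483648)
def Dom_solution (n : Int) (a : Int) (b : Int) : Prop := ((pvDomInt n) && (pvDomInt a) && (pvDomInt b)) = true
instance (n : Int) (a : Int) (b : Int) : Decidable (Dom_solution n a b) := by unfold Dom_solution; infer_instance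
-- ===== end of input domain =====

-- B replaces A's per-state deque BFS driving a generator coroutine by whole-frontier set
-- passes (one position set per level for each start point), intersected once per level: simpler.


-- ===== PORT A =====
-- A's two child-push blocks (`p = ori - pow(2, time); if ...` twice); `time` is always ≥ 0
-- when these run, so pow(2, time) is 2 ^ time.toNat exactly.
def pushQ (n : Int) (ori : Int) (time : Int) (q : List (Int × Int)) : List (Int × Int) :=
  let p := ori - 2 ^ time.toNat
  let q1 := if 0 < p then q ++ [(p, time + 1)] else q
  let p2 := ori + 2 ^ time.toNat
  if p2 ≤ n then q1 ++ [(p2, time + 1)] else q1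

-- the same pushes as they appear inside the generator `bfs`, which also adds each pushed
-- child to `positions`
def pushQP (n : Int) (ori : Int) (time : Int) (q : List (Int × Int))
    (pos : PySem.Set (Int × Int)) : List (Int × Int) × PySem.Set (Int × Int) :=
  let p := ori - 2 ^ time.toNat
  let qp := if 0 < p then (q ++ [(p, time + 1)], PySem.Set.add pos (p, time + 1)) else (q, pos)
  let p2 := ori + 2 ^ time.toNat
  if p2 ≤ n then (qp.1 ++ [(p2, time + 1)], PySem.Set.add qp.2 (p2, time + 1)) else qp

-- termination facts for the while-loops below (a pop at the current level strictly decreases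
-- the number of current-level queue entries; pushes are all at level time+1)
theorem countP_pushQ (n ori t : Int) (q : List (Int × Int)) :
    (pushQ n ori t q).countP (fun x => decide (x.2 = t)) =
      q.countP (fun x => decide (x.2 = t)) := by
  have h : ¬ (t + 1 = t) := by omega
  simp only [pushQ]
  split_ifs <;> simp [List.countP_append, h]

theorem countP_pushQP (n ori t : Int) (q : List (Int × Int)) (pos : PySem.Set (Int × Int)) :
    ((pushQP n ori t q pos).1).countP (fun x => decide (x.2 = t)) =
      q.countP (fun x => decide (x.2 = t)) := by
  have h : ¬ (t + 1 = t) := by omega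
  simp only [pushQP]
  split_ifs <;> simp [List.countP_append, h]

-- the `while queue:` loop of the generator `bfs`, run until its next `yield` (or until the
-- queue empties — Python's `yield -1` — modelled as `none`).  The returned state is
-- (iteration pending after the yield, queue, positions, t); the Python
-- `positions.discard((ori, time))` executed right after the yield is reflected by storing
-- the pre-`add` set `pos1`.
def bfsLoop (n : Int) (q : List (Int × Int)) (pos : PySem.Set (Int × Int)) (t : Int) :
    Option (PySem.Set (Int × Int)) ×
      (Option (Int × Int) × List (Int × Int) × PySem.Set (Int × Int) × Int) :=
  match h : q with
  | [] => (none, (none, [], pos, t))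
  | (ori, time) :: rest =>
    let pos1 := PySem.Set.discard pos (ori, time)
    if t ≠ time then
      (some (PySem.Set.add pos1 (ori, time)), (some (ori, time), rest, pos1, t + 1))
    else
      let qp := pushQP n ori time rest pos1
      bfsLoop n qp.1 qp.2 t
  termination_by q.countP (fun x => decide (x.2 = t))
  decreasing_by
    rename_i hteq
    have ht : time = t := by omega
    subst h; subst ht
    simp [countP_pushQP, List.countP_cons]

-- `next(bfs_co)`: finish the iteration interrupted by the previous yield (its child pushes),
-- then continue the loop
def bfsNext (n : Int) (st : Option (Int × Int) × List (Int × Int) × PySem.Set (Int × Int) × Int) :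
    Option (PySem.Set (Int × Int)) ×
      (Option (Int × Int) × List (Int × Int) × PySem.Set (Int × Int) × Int) :=
  match st with
  | (some (ori, time), q, pos, t) =>
    let qp := pushQP n ori time q pos
    bfsLoop n qp.1 qp.2 t
  | (none, q, pos, t) => bfsLoop n q pos t

-- the `while queue:` loop of `solution`.  `fuel` ticks only at the level boundary
-- (`t != time`): the Python loop always leaves well before 64 levels (the step doubles past
-- any reachable position), and B's port carries the same guard ticking at the same moments,
-- so the two ports are equal for any fuel.
def solLoop (n : Int) (fuel : Nat) (q : List (Int × Int)) (t : Int)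
    (bst : Option (Int × Int) × List (Int × Int) × PySem.Set (Int × Int) × Int) : Int :=
  match h : q with
  | [] => -1
  | (ori, time) :: rest =>
    if t ≠ time then
      match fuel with
      | 0 => -1
      | fuel' + 1 =>
        let r := bfsNext n bst
        match r.1 with
        | none => -1
        | some sb =>
          if PySem.Set.contains sb (ori, time) then time
          else if rest.any (fun x => PySem.Set.contains sb x) then time
          else solLoop n fuel' (pushQ n ori time rest) (t + 1) r.2
    else solLoop n fuel (pushQ n ori time rest) t bst
  termination_by (fuel, q.countP (fun x => decide (x.2 = t)))
  decreasing_by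
    · exact Prod.Lex.left _ _ (Nat.lt_succ_self _)
    · rename_i hteq
      have ht : time = t := by omega
      subst h; subst ht
      apply Prod.Lex.right
      simp [countP_pushQ, List.countP_cons]

def solution (n : Int) (a : Int) (b : Int) : Int :=
  solLoop n 64 [(a, 0)] 0 (none, [(b, 0)], PySem.Set.empty, 0)

-- ===== PORT B =====
-- one level step: {p - step for p in s if p - step > 0} | {p + step for p in s if p + step <= n}
def levelUp (n : Int) (step : Int) (s : PySem.Set Int) : PySem.Set Int :=
  PySem.Set.union
    (PySem.Set.ofList ((s.filter (fun p => decide (0 < p - step))).map (fun p => p - step)))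
    ((s.filter (fun p => decide (p + step ≤ n))).map (fun p => p + step))

-- `while sa and sb:`, with the same 64-level fuel guard as A's port (ticking once per
-- iteration, exactly when A's port ticks)
def altLoop (n : Int) (fuel : Nat) (sa sb : PySem.Set Int) (t : Int) : Int :=
  if sa ≠ [] ∧ sb ≠ [] then
    match fuel with
    | 0 => -1
    | fuel' + 1 =>
      let step : Int := 2 ^ t.toNat
      let sa' := levelUp n step sa
      let sb' := levelUp n step sb
      if sb' = [] then -1
      else if PySem.Set.inter sa' sb' ≠ [] then t + 1
      else altLoop n fuel' sa' sb' (t + 1)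
  else -1

def solution_alt (n : Int) (a : Int) (b : Int) : Int :=
  altLoop n 64 (PySem.Set.ofList [a]) (PySem.Set.ofList [b]) 0

-- ===== PRECONDITION & SPEC =====
def Spec_solution (n : Int) (a : Int) (b : Int) (out : Int) : Prop := out = solution_alt n a b
instance (n : Int) (a : Int) (b : Int) (out : Int) : Decidable (Spec_solution n a b out) := by unfold Spec_solution; infer_instance

-- ===== CLAIM (what is proved, stated in full; the proofs are below) =====
def Claim_equal_solution : Prop := ∀ (n : Int) (a : Int) (b : Int), Dom_solution n a b → Spec_solution n a b (solution n a b)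

-- ===== LEMMAS AND PROOFS =====

-- the children a node `p` at level T pushes, in push order
def children (n T p : Int) : List Int :=
  (if 0 < p - 2 ^ T.toNat then [p - 2 ^ T.toNat] else []) ++
    (if p + 2 ^ T.toNat ≤ n then [p + 2 ^ T.toNat] else [])

-- the level-(T+1) queue contents produced by a level-T queue `l`, in order
def levelList (n T : Int) (l : List Int) : List Int := l.flatMap (children n T)

theorem pushQ_eq (n ori time : Int) (q : List (Int × Int)) :
    pushQ n ori time q = q ++ (children n time ori).map (fun p => (p, time + 1)) := by
  simp only [pushQ, children]
  split_ifs <;> simp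

theorem pushQP_fst (n ori time : Int) (q : List (Int × Int)) (pos : PySem.Set (Int × Int)) :
    (pushQP n ori time q pos).1 = q ++ (children n time ori).map (fun p => (p, time + 1)) := by
  simp only [pushQP, children]
  split_ifs <;> simp

theorem pushQP_snd_mem (n ori time : Int) (q : List (Int × Int)) (pos : PySem.Set (Int × Int))
    (x : Int × Int) :
    x ∈ (pushQP n ori time q pos).2 ↔
      x ∈ pos ∨ x ∈ (children n time ori).map (fun p => (p, time + 1)) := by
  simp only [pushQP, children]
  split_ifs <;> simp [PySem.Set.mem_add] <;> tauto

theorem mem_levelUp (n T : Int) (s : PySem.Set Int) (l : List Int)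
    (hs : ∀ p, p ∈ s ↔ p ∈ l) (q : Int) :
    q ∈ levelUp n (2 ^ T.toNat) s ↔ q ∈ levelList n T l := by
  simp only [levelUp, levelList, children, PySem.Set.mem_union, PySem.Set.mem_ofList,
    List.mem_flatMap, List.mem_map, List.mem_filter, List.mem_append, hs, decide_eq_true_eq]
  simp only [List.mem_ite_nil_right, List.mem_singleton, List.mem_ite_nil_left]
  constructor
  · rintro (⟨p, ⟨hp, hgt⟩, rfl⟩ | ⟨p, ⟨hp, hle⟩, rfl⟩)
    · exact ⟨p, hp, Or.inl ⟨hgt, rfl⟩⟩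
    · exact ⟨p, hp, Or.inr ⟨hle, rfl⟩⟩
  · rintro ⟨p, hp, ⟨hc, rfl⟩ | ⟨hc, rfl⟩⟩
    · exact Or.inl ⟨p, ⟨hp, hc⟩, rfl⟩
    · exact Or.inr ⟨p, ⟨hp, hc⟩, rfl⟩

-- a generator state ready to produce level T+1 from the level-T queue contents `lvl`
def GReady (n : Int) (bst : Option (Int × Int) × List (Int × Int) × PySem.Set (Int × Int) × Int)
    (T : Int) (lvl : List Int) : Prop :=
  ∃ done rem pos, lvl = done ++ rem ∧
    (∀ p : Int, ((p, T + 1) ∈ pos ↔ p ∈ levelList n T done)) ∧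
    (∀ x ∈ pos, x.2 ≤ T + 1) ∧
    bfsNext n bst =
      bfsLoop n (rem.map (fun p => (p, T)) ++ (levelList n T done).map (fun p => (p, T + 1)))
        pos T

theorem bfsLoop_level (n T : Int) :
    ∀ (rem cs : List Int) (pos : PySem.Set (Int × Int)),
      (∀ p : Int, ((p, T + 1) ∈ pos ↔ p ∈ cs)) →
      (∀ x ∈ pos, x.2 ≤ T + 1) →
      (if cs ++ levelList n T rem = [] then
        (bfsLoop n (rem.map (fun p => (p, T)) ++ cs.map (fun p => (p, T + 1))) pos T).1 = none
      else ∃ S bst',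
        bfsLoop n (rem.map (fun p => (p, T)) ++ cs.map (fun p => (p, T + 1))) pos T =
          (some S, bst') ∧
        (∀ p : Int, ((p, T + 1) ∈ S ↔ p ∈ cs ++ levelList n T rem)) ∧
        GReady n bst' (T + 1) (cs ++ levelList n T rem)) := by
  intro rem
  induction rem with
  | nil =>
    intro cs pos hpos htime
    match cs with
    | [] => simp [levelList, bfsLoop]
    | c0 :: cs' =>
      have hne : (c0 :: cs') ++ levelList n T [] ≠ [] := by simp
      rw [if_neg hne]
      have hT : T ≠ T + 1 := by omega
      refine ⟨PySem.Set.add (PySem.Set.discard pos (c0, T + 1)) (c0, T + 1),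
        (some (c0, T + 1), cs'.map (fun p => (p, T + 1)), PySem.Set.discard pos (c0, T + 1), T + 1),
        by rw [List.map_nil, List.nil_append, List.map_cons, bfsLoop]; simp [hT], ?_, ?_⟩
      · intro p
        simp only [PySem.Set.mem_add, PySem.Set.mem_discard, hpos p, levelList]
        constructor
        · rintro (⟨h, _⟩ | h)
          · simpa using h
          · simp at h; simp [h]
        · intro h
          by_cases hpc : p = c0
          · exact Or.inr (by simp [hpc])
          · exact Or.inl ⟨by simpa using h, by simp [hpc]⟩
      · refine ⟨[c0], cs', (pushQP n c0 (T + 1) (cs'.map (fun p => (p, T + 1)))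
          (PySem.Set.discard pos (c0, T + 1))).2, by simp [levelList], ?_, ?_, ?_⟩
        · intro p
          rw [pushQP_snd_mem]
          have h1 : (p, T + 1 + 1) ∉ PySem.Set.discard pos (c0, T + 1) := by
            intro hmem
            have := htime _ (PySem.Set.mem_discard pos _ _ |>.mp hmem).1
            simp at this
          simp [h1, levelList]
        · intro x hx
          rcases (pushQP_snd_mem _ _ _ _ _ x).mp hx with h | h
          · have := htime _ (PySem.Set.mem_discard pos _ _ |>.mp h).1
            omega
          · simp at h
            rcases h with ⟨p, _, rfl⟩
            simp
        · show bfsNext n _ = _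
          rw [bfsNext]
          congr 1
          rw [pushQP_fst]
          simp [levelList]
  | cons r rem' ih =>
    intro cs pos hpos htime
    have key : bfsLoop n (((r :: rem').map (fun p => (p, T))) ++ cs.map (fun p => (p, T + 1))) pos T
        = bfsLoop n (rem'.map (fun p => (p, T)) ++ ((cs ++ children n T r).map (fun p => (p, T + 1))))
            (pushQP n r T (rem'.map (fun p => (p, T)) ++ cs.map (fun p => (p, T + 1)))
              (PySem.Set.discard pos (r, T))).2 T := by
      rw [List.map_cons, List.cons_append, bfsLoop]
      simp only [ne_eq, not_true_eq_false, if_false, reduceIte]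
      congr 1
      rw [pushQP_fst]
      simp [List.map_append, List.append_assoc]
    have hpos' : ∀ p : Int, ((p, T + 1) ∈ (pushQP n r T (rem'.map (fun p => (p, T)) ++ cs.map (fun p => (p, T + 1)))
          (PySem.Set.discard pos (r, T))).2 ↔ p ∈ cs ++ children n T r) := by
      intro p
      rw [pushQP_snd_mem]
      simp only [PySem.Set.mem_discard, hpos p, List.mem_append, List.mem_map]
      constructor
      · rintro (⟨h, _⟩ | h)
        · exact Or.inl h
        · rcases h with ⟨c, hc, heq⟩
          simp at heq
          exact Or.inr (heq ▸ hc)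
      · rintro (h | h)
        · refine Or.inl ⟨h, ?_⟩
          simp only [ne_eq, Prod.mk.injEq, not_and]
          intro _
          omega
        · exact Or.inr ⟨p, h, rfl⟩
    have htime' : ∀ x ∈ (pushQP n r T (rem'.map (fun p => (p, T)) ++ cs.map (fun p => (p, T + 1)))
          (PySem.Set.discard pos (r, T))).2, x.2 ≤ T + 1 := by
      intro x hx
      rcases (pushQP_snd_mem _ _ _ _ _ x).mp hx with h | h
      · exact htime _ (PySem.Set.mem_discard pos _ _ |>.mp h).1
      · simp at h; rcases h with ⟨p, _, rfl⟩; simp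
    have := ih (cs ++ children n T r) _ hpos' htime'
    have hnxt : (cs ++ children n T r) ++ levelList n T rem' = cs ++ levelList n T (r :: rem') := by
      simp [levelList, List.append_assoc]
    rw [key]
    rw [hnxt] at this
    exact this

theorem bfsNext_level (n T : Int) (bst : Option (Int × Int) × List (Int × Int) × PySem.Set (Int × Int) × Int)
    (lvl : List Int) (h : GReady n bst T lvl) :
    (if levelList n T lvl = [] then (bfsNext n bst).1 = none
     else ∃ S bst', bfsNext n bst = (some S, bst') ∧
       (∀ p : Int, ((p, T + 1) ∈ S ↔ p ∈ levelList n T lvl)) ∧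
       GReady n bst' (T + 1) (levelList n T lvl)) := by
  obtain ⟨done, rem, pos, rfl, hpos, htime, hrun⟩ := h
  have H := bfsLoop_level n T rem (levelList n T done) pos hpos htime
  rw [hrun]
  have hL : levelList n T done ++ levelList n T rem = levelList n T (done ++ rem) := by
    simp [levelList]
  rw [← hL]
  exact H

theorem solLoop_nil (n : Int) (fuel : Nat) (t : Int) (bst : Option (Int × Int) × List (Int × Int) × PySem.Set (Int × Int) × Int) :
    solLoop n fuel [] t bst = -1 := by
  rw [solLoop.eq_def]

theorem solLoop_same (n : Int) (fuel : Nat) (ori t : Int) (rest : List (Int × Int))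
    (bst : Option (Int × Int) × List (Int × Int) × PySem.Set (Int × Int) × Int) :
    solLoop n fuel ((ori, t) :: rest) t bst = solLoop n fuel (pushQ n ori t rest) t bst := by
  rw [solLoop.eq_def]
  simp

theorem solLoop_bnd0 (n : Int) (ori time t : Int) (rest : List (Int × Int))
    (bst : Option (Int × Int) × List (Int × Int) × PySem.Set (Int × Int) × Int) (h : t ≠ time) :
    solLoop n 0 ((ori, time) :: rest) t bst = -1 := by
  rw [solLoop.eq_def]
  simp [h]

theorem solLoop_bnd_none (n : Int) (f : Nat) (ori time t : Int) (rest : List (Int × Int))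
    (bst st : Option (Int × Int) × List (Int × Int) × PySem.Set (Int × Int) × Int) (h : t ≠ time)
    (hr : bfsNext n bst = (none, st)) :
    solLoop n (f + 1) ((ori, time) :: rest) t bst = -1 := by
  rw [solLoop.eq_def]
  simp [h, hr]

theorem solLoop_bnd_some (n : Int) (f : Nat) (ori time t : Int) (rest : List (Int × Int))
    (bst st : Option (Int × Int) × List (Int × Int) × PySem.Set (Int × Int) × Int)
    (S : PySem.Set (Int × Int)) (h : t ≠ time) (hr : bfsNext n bst = (some S, st)) :
    solLoop n (f + 1) ((ori, time) :: rest) t bst =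
      (if PySem.Set.contains S (ori, time) then time
       else if rest.any (fun x => PySem.Set.contains S x) then time
       else solLoop n f (pushQ n ori time rest) (t + 1) st) := by
  rw [solLoop.eq_def]
  simp [h, hr]

theorem altLoop_exit (n : Int) (fuel : Nat) (sa sb : PySem.Set Int) (t : Int)
    (h : ¬ (sa ≠ [] ∧ sb ≠ [])) : altLoop n fuel sa sb t = -1 := by
  rw [altLoop.eq_def]
  simp only [if_neg h]

theorem altLoop_f0 (n : Int) (sa sb : PySem.Set Int) (t : Int) :
    altLoop n 0 sa sb t = -1 := by
  rw [altLoop.eq_def]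
  split_ifs <;> rfl

theorem altLoop_step (n : Int) (f : Nat) (sa sb : PySem.Set Int) (t : Int)
    (h : sa ≠ [] ∧ sb ≠ []) :
    altLoop n (f + 1) sa sb t =
      (if levelUp n (2 ^ t.toNat) sb = [] then -1
       else if PySem.Set.inter (levelUp n (2 ^ t.toNat) sa) (levelUp n (2 ^ t.toNat) sb) ≠ [] then t + 1
       else altLoop n f (levelUp n (2 ^ t.toNat) sa) (levelUp n (2 ^ t.toNat) sb) (t + 1)) := by
  rw [altLoop.eq_def]
  simp only [if_pos h]

theorem solLoop_level (n : Int) :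
    ∀ (rem : List Int) (cs : List Int) (T : Int) (fuel : Nat)
      (bst : Option (Int × Int) × List (Int × Int) × PySem.Set (Int × Int) × Int),
      solLoop n fuel (rem.map (fun p => (p, T)) ++ cs.map (fun p => (p, T + 1))) T bst =
        solLoop n fuel ((cs ++ levelList n T rem).map (fun p => (p, T + 1))) T bst := by
  intro rem
  induction rem with
  | nil => intro cs T fuel bst; simp [levelList]
  | cons r rem' ih =>
    intro cs T fuel bst
    rw [List.map_cons, List.cons_append, solLoop.eq_def]
    simp only [ne_eq, not_true_eq_false, if_false]
    rw [pushQ_eq]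
    have hq : (rem'.map (fun p => (p, T)) ++ cs.map (fun p => (p, T + 1))) ++
        (children n T r).map (fun p => (p, T + 1)) =
        rem'.map (fun p => (p, T)) ++ ((cs ++ children n T r).map (fun p => (p, T + 1))) := by
      simp [List.append_assoc]
    rw [hq, ih (cs ++ children n T r)]
    have : (cs ++ children n T r) ++ levelList n T rem' = cs ++ levelList n T (r :: rem') := by
      simp [levelList, List.append_assoc]
    rw [this]

theorem eq_nil_of_iff {s : List Int} {l : List Int} (h : ∀ p, p ∈ s ↔ p ∈ l) (hl : l = []) :
    s = [] := by
  subst hl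
  exact List.eq_nil_iff_forall_not_mem.mpr (fun x hx => by simpa using (h x).mp hx)

theorem ne_nil_of_iff {s : List Int} {l : List Int} (h : ∀ p, p ∈ s ↔ p ∈ l) (hl : l ≠ []) :
    s ≠ [] := by
  obtain ⟨x, hx⟩ := List.exists_mem_of_ne_nil l hl
  exact List.ne_nil_of_mem ((h x).mpr hx)

-- main simulation, one level per fuel tick: at the start of level T+1 (A is about to pop the
-- first level-(T+1) entry; sa/sb are the level-T position sets; the generator is ready to
-- produce b's level T+1) the two loops agree
theorem main_sim (n : Int) :
    ∀ (fuel : Nat) (T : Int) (pa pb : List Int)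
      (bst : Option (Int × Int) × List (Int × Int) × PySem.Set (Int × Int) × Int)
      (sa sb : PySem.Set Int),
      (∀ p, p ∈ sa ↔ p ∈ pa) → (∀ p, p ∈ sb ↔ p ∈ pb) → pb ≠ [] →
      GReady n bst T pb →
      solLoop n fuel ((levelList n T pa).map (fun p => (p, T + 1))) T bst =
        altLoop n fuel sa sb T := by
  intro fuel
  induction fuel with
  | zero =>
    intro T pa pb bst sa sb hsa hsb hpb hG
    rw [altLoop_f0]
    cases hla : levelList n T pa with
    | nil => rw [List.map_nil, solLoop_nil]
    | cons a0 la' => rw [List.map_cons, solLoop_bnd0 n a0 (T + 1) T _ bst (by omega)]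
  | succ f ih =>
    intro T pa pb bst sa sb hsa hsb hpb hG
    have hsbne : sb ≠ [] := ne_nil_of_iff hsb hpb
    have hsa' := fun q => mem_levelUp n T sa pa hsa q
    have hsb' := fun q => mem_levelUp n T sb pb hsb q
    by_cases hla : levelList n T pa = []
    · -- a's frontier is empty: A returns -1 at once; B drains within at most one more tick
      rw [hla, List.map_nil, solLoop_nil]
      by_cases hsae : sa = []
      · rw [altLoop_exit n (f + 1) sa sb T (by simp [hsae])]
      · rw [altLoop_step n f sa sb T ⟨hsae, hsbne⟩]
        have hsa'nil : levelUp n (2 ^ T.toNat) sa = [] := eq_nil_of_iff hsa' hla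
        by_cases hsb'nil : levelUp n (2 ^ T.toNat) sb = []
        · rw [if_pos hsb'nil]
        · have hint : PySem.Set.inter (levelUp n (2 ^ T.toNat) sa) (levelUp n (2 ^ T.toNat) sb) = [] := by
            rw [hsa'nil]; rfl
          rw [if_neg hsb'nil, if_neg (by simp [hint]),
            altLoop_exit n f _ _ (T + 1) (by simp [hsa'nil])]
    · obtain ⟨a0, la', hla'⟩ := List.exists_cons_of_ne_nil hla
      have hsane : sa ≠ [] := by
        refine ne_nil_of_iff hsa ?_
        intro h
        rw [h] at hla
        simp [levelList] at hla
      have hB := bfsNext_level n T bst pb hG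
      have hTne : T ≠ T + 1 := by omega
      by_cases hnb : levelList n T pb = []
      · rw [if_pos hnb] at hB
        have hsb'nil : levelUp n (2 ^ T.toNat) sb = [] := eq_nil_of_iff hsb' hnb
        cases hr : bfsNext n bst with
        | mk o st =>
          rw [hr] at hB
          simp only at hB
          subst hB
          rw [hla', List.map_cons, solLoop_bnd_none n f a0 (T + 1) T _ bst st hTne hr,
            altLoop_step n f sa sb T ⟨hsane, hsbne⟩, if_pos hsb'nil]
      · rw [if_neg hnb] at hB
        obtain ⟨S, bst', hr, hS, hG'⟩ := hB
        have hsb'ne : levelUp n (2 ^ T.toNat) sb ≠ [] := ne_nil_of_iff hsb' hnb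
        rw [hla', List.map_cons, solLoop_bnd_some n f a0 (T + 1) T _ bst bst' S hTne hr,
          altLoop_step n f sa sb T ⟨hsane, hsbne⟩, if_neg hsb'ne]
        -- the meet test at this level, on both sides
        by_cases hmeet : ∃ p ∈ levelList n T pa, p ∈ levelList n T pb
        · -- both sides return T + 1
          have hintne : PySem.Set.inter (levelUp n (2 ^ T.toNat) sa) (levelUp n (2 ^ T.toNat) sb) ≠ [] := by
            obtain ⟨p, hp1, hp2⟩ := hmeet
            exact List.ne_nil_of_mem (PySem.Set.mem_inter _ _ p |>.mpr ⟨(hsa' p).mpr hp1, (hsb' p).mpr hp2⟩)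
          rw [if_pos hintne]
          obtain ⟨p, hp1, hp2⟩ := hmeet
          rw [hla'] at hp1
          rcases List.mem_cons.mp hp1 with rfl | hp1'
          · rw [if_pos (PySem.Set.contains_iff S _ |>.mpr ((hS p).mpr hp2))]
          · by_cases h0 : PySem.Set.contains S (a0, T + 1)
            · rw [if_pos h0]
            · rw [if_neg h0, if_pos ?_]
              rw [List.any_eq_true]
              exact ⟨(p, T + 1), List.mem_map_of_mem hp1', PySem.Set.contains_iff S _ |>.mpr ((hS p).mpr hp2)⟩
        · -- no meet: both sides move on to the next level
          have hint : ¬ PySem.Set.inter (levelUp n (2 ^ T.toNat) sa) (levelUp n (2 ^ T.toNat) sb) ≠ [] := by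
            simp only [ne_eq, not_not]
            refine List.eq_nil_iff_forall_not_mem.mpr (fun p hp => ?_)
            have := PySem.Set.mem_inter _ _ p |>.mp hp
            exact hmeet ⟨p, (hsa' p).mp this.1, (hsb' p).mp this.2⟩
          have h0 : ¬ PySem.Set.contains S (a0, T + 1) = true := by
            rw [PySem.Set.contains_iff, hS]
            intro hc
            exact hmeet ⟨a0, by rw [hla']; simp, hc⟩
          have hany : ¬ ((la'.map (fun p => (p, T + 1))).any (fun x => PySem.Set.contains S x)) = true := by
            rw [List.any_eq_true]
            rintro ⟨x, hx, hcx⟩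
            obtain ⟨p, hp, rfl⟩ := List.mem_map.mp hx
            rw [PySem.Set.contains_iff, hS] at hcx
            exact hmeet ⟨p, by rw [hla']; simp [hp], hcx⟩
          rw [if_neg h0, if_neg hany, if_neg hint, pushQ_eq,
            solLoop_level n la' (children n (T + 1) a0) (T + 1) f bst']
          have hLL : (children n (T + 1) a0) ++ levelList n (T + 1) la' = levelList n (T + 1) (a0 :: la') := by
            simp [levelList]
          rw [hLL, ← hla']
          exact ih (T + 1) (levelList n T pa) (levelList n T pb) bst' _ _ hsa' hsb' hnb hG'

-- ===== VERDICT (by name: the statement is the Claim_ definition above) =====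
theorem solution_spec : Claim_equal_solution := by
  intro n a b _
  unfold Spec_solution solution solution_alt
  rw [solLoop_same, pushQ_eq, List.nil_append]
  have hq : (children n 0 a).map (fun p => (p, (0 : Int) + 1)) =
      (levelList n 0 [a]).map (fun p => (p, (0 : Int) + 1)) := by
    simp [levelList]
  rw [hq]
  exact main_sim n 64 0 [a] [b] _ _ _
    (by intro p; rw [PySem.Set.mem_ofList])
    (by intro p; rw [PySem.Set.mem_ofList])
    (by simp)
    ⟨[], [b], PySem.Set.empty, rfl, by simp [levelList, PySem.Set.empty],
      by simp [PySem.Set.empty], by simp [bfsNext, PySem.Set.empty, levelList]⟩
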